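-- pv_equiv track=rewrite | github.com/SJTU-IPADS/reef | script/transform_kernel.py | replace_global_with_device
-- ===== SOURCE A (Python) =====
-- def split_function_declaration(line):
--     parts = line.split("void")
--     right_parts = parts[1].split("(")
--     name = right_parts[0].strip()
--     parameters_str = right_parts[1].split(")")[0]
--     return_type = "void"
--     header = parts[0]
--     parameter_str_list = parameters_str.split(", ")
--     parameters = []
--     for param_str in parameter_str_list:
--         parts = param_str.split(" ")
--         param_name = parts[-1]
--         param_type = " ".join(parts[:-1])
--         parameters.append({"name": param_name, "type": param_type})
--     return header, return_type, name, parameters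
--
-- def generate_function_declaration(return_type, name, params):
--     params_str_list = []
--     for param in params:
--         param_str = param["type"] + " " + param["name"]
--         params_str_list.append(param_str)
--     return return_type + " " + name + "(" + ", ".join(params_str_list) + ")"
--
-- def replace_global_with_device(lines):
--     new_lines = []
--     for line in lines:
--         if line.find("void") != -1:
--             header, return_type, func_name, func_params = split_function_declaration(line)
--             new_line = "__device__ " + generate_function_declaration(return_type, func_name + "_device", func_params)
--             if line.find("{") != -1:
--                 new_line = new_line + "{"
--             new_line = new_line + "\n"
--             new_lines.append(new_line)
--         else:
--             new_lines.append(line)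
--     return new_lines
-- ===== SOURCE B (Python) =====
-- def replace_global_with_device(lines):
--     out = []
--     for line in lines:
--         if "void" in line:
--             mid = line.split("void")[1]
--             name = mid.split("(")[0].strip()
--             params = mid.split("(")[1].split(")")[0]
--             new = "__device__ void " + name + "_device(" + params + ")"
--             if "{" in line:
--                 new += "{"
--             out.append(new + "\n")
--         else:
--             out.append(line)
--     return out
-- ===== Notes on version B (the rewrite author's own statement) =====
-- stated objective: simpler
-- what changed: A's three-function pipeline (split the declaration into a header, name and a list of {name,type} parameter dicts, then rejoin them) is collapsed into one loop that slices the name and the parameter substring straight out of the line and reuses the parameter substring verbatim, eliminating the inner parameter-parsing loop and the dict list entirely.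
-- intended difference: On lines containing 'void' whose parenthesised parameter text has a ', '-segment with no space (e.g. an empty or untyped parameter list such as 'void f(x)'), A's empty-type rejoin returns a declaration with a stray leading space in that parameter ('f_device( x)') while B keeps the parameter text verbatim ('f_device(x)'), which is the intended rewrite. — e.g. on replace_global_with_device(["void f(x)"]): A returns ["__device__ void f_device( x)\n"], B returns ["__device__ void f_device(x)\n"]
import Mathlib
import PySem

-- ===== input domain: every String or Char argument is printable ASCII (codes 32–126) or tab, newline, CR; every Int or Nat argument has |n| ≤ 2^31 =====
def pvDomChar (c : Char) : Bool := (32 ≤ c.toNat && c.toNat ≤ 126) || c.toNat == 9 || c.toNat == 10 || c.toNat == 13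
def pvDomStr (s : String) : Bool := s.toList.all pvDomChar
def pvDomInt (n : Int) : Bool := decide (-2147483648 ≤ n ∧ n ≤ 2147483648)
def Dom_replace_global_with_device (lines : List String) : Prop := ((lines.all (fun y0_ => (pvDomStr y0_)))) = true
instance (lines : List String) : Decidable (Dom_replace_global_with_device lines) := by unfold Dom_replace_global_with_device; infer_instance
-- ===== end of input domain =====

-- B collapses A's three functions (split into name/param dicts, rejoin) into one pass that slices the
-- name and the parameter text straight out of the line and reuses the parameter text verbatim;
-- objective: simpler. On lines with a space-free parameter segment B drops A's stray space (see D_).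

-- ===== PORT A =====
def pvSplitFunctionDeclaration (line : String) :
    String × String × String × List (PySem.Dict String String) :=
  let parts := (PySem.Str.split? line "void").getD []
  let right_parts := (PySem.Str.split? ((PySem.List.pyGet? parts 1).getD "") "(").getD []
  let name := PySem.Str.strip ((PySem.List.pyGet? right_parts 0).getD "")
  let parameters_str :=
    (PySem.List.pyGet? ((PySem.Str.split? ((PySem.List.pyGet? right_parts 1).getD "") ")").getD []) 0).getD ""
  let return_type := "void"
  let header := (PySem.List.pyGet? parts 0).getD ""
  let parameter_str_list := (PySem.Str.split? parameters_str ", ").getD []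
  let parameters := parameter_str_list.foldl (fun acc param_str =>
    let ps := (PySem.Str.split? param_str " ").getD []
    let param_name := (PySem.List.pyGet? ps (-1)).getD ""
    let param_type := PySem.Str.join " " (PySem.List.slice ps none (some (-1)))
    acc ++ [⟨[("name", param_name), ("type", param_type)]⟩]) []
  (header, return_type, name, parameters)

def pvGenerateFunctionDeclaration (return_type name : String)
    (params : List (PySem.Dict String String)) : String :=
  let params_str_list := params.foldl (fun acc param =>
    acc ++ [(PySem.Dict.get? param "type").getD "" ++ " " ++ (PySem.Dict.get? param "name").getD ""]) []
  return_type ++ " " ++ name ++ "(" ++ PySem.Str.join ", " params_str_list ++ ")"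

def replace_global_with_device (lines : List String) : List String :=
  lines.foldl (fun new_lines line =>
    if PySem.Str.find line "void" ≠ -1 then
      let sd := pvSplitFunctionDeclaration line
      let new_line := "__device__ " ++ pvGenerateFunctionDeclaration sd.2.1 (sd.2.2.1 ++ "_device") sd.2.2.2
      let new_line2 := if PySem.Str.find line "{" ≠ -1 then new_line ++ "{" else new_line
      new_lines ++ [new_line2 ++ "\n"]
    else new_lines ++ [line]) []

-- ===== PORT B =====
def replace_global_with_device_alt (lines : List String) : List String :=
  lines.foldl (fun out line =>
    if PySem.Str.isIn "void" line then
      let mid := (PySem.List.pyGet? ((PySem.Str.split? line "void").getD []) 1).getD ""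
      let name := PySem.Str.strip ((PySem.List.pyGet? ((PySem.Str.split? mid "(").getD []) 0).getD "")
      let params :=
        (PySem.List.pyGet? ((PySem.Str.split?
          ((PySem.List.pyGet? ((PySem.Str.split? mid "(").getD []) 1).getD "") ")").getD []) 0).getD ""
      out ++ ["__device__ void " ++ name ++ "_device(" ++ params ++ ")" ++
        (if PySem.Str.isIn "{" line then "{" else "") ++ "\n"]
    else out ++ [line]) []

-- ===== PRECONDITION & SPEC =====
-- Pre_ excludes exactly the inputs on which the Python A raises IndexError: a line that contains
-- "void" but whose text after the first "void" contains no "(".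
def Pre_replace_global_with_device (lines : List String) : Prop :=
  ∀ line ∈ lines, PySem.Str.find line "void" ≠ -1 →
    PySem.Str.isIn "(" ((PySem.List.pyGet? ((PySem.Str.split? line "void").getD []) 1).getD "") = true
instance (lines : List String) : Decidable (Pre_replace_global_with_device lines) := by
  unfold Pre_replace_global_with_device; infer_instance
def pvWitness_replace_global_with_device : List String :=
  ["void add(int a, int b) {", "  return;", "}"]

-- the text of cs between the first and second occurrence of the pattern p
def pvCut (p cs : List Char) : List Char := ((PySem.Chars.splitOn cs p).drop 1).headD []

-- "bad" line: it contains "void" and its parenthesised parameter text (between the first "(" after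
-- the first "void" and the following ")"/"(") has a ", "-segment containing no space
-- (a character-level shape condition on the input line; it computes no output of either program)
def pvBadLine (line : String) : Bool :=
  PySem.Chars.isIn "void".toList line.toList &&
    (PySem.Chars.splitOn
      ((PySem.Chars.splitOn (pvCut "(".toList (pvCut "void".toList line.toList)) ")".toList).headD [])
      ", ".toList).any (fun s => ! PySem.Chars.isIn " ".toList s)

-- On lines containing "void" whose parameter text has a ", "-segment with no space (an empty or
-- untyped parameter), A's empty-type rejoin returns the declaration with a stray leading space in
-- that parameter ("f_device( x)"); B keeps the parameter text verbatim ("f_device(x)"), the intended rewrite.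
def D_replace_global_with_device (lines : List String) : Prop :=
  ∃ line ∈ lines, pvBadLine line = true
instance (lines : List String) : Decidable (D_replace_global_with_device lines) := by
  unfold D_replace_global_with_device; infer_instance

def Spec_replace_global_with_device (lines : List String) (out : List String) : Prop :=
  ¬ D_replace_global_with_device lines → out = replace_global_with_device_alt lines
instance (lines : List String) (out : List String) : Decidable (Spec_replace_global_with_device lines out) := by
  unfold Spec_replace_global_with_device; infer_instance

def pvDiffWitness_replace_global_with_device : List String := ["void f(x)"]
def pvDiffWitnessOut_replace_global_with_device : (List String) × (List String) :=
  (["__device__ void f_device( x)\n"], ["__device__ void f_device(x)\n"])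

-- ===== CLAIM (what is proved, stated in full; the proofs are below) =====
def Claim_unchanged_replace_global_with_device : Prop := ∀ (lines : List String), Dom_replace_global_with_device lines → Pre_replace_global_with_device lines → Spec_replace_global_with_device lines (replace_global_with_device lines)
def Claim_changed_replace_global_with_device : Prop := Dom_replace_global_with_device (pvDiffWitness_replace_global_with_device) ∧ Pre_replace_global_with_device (pvDiffWitness_replace_global_with_device) ∧ D_replace_global_with_device (pvDiffWitness_replace_global_with_device) ∧ replace_global_with_device (pvDiffWitness_replace_global_with_device) = pvDiffWitnessOut_replace_global_with_device.1 ∧ replace_global_with_device_alt (pvDiffWitness_replace_global_with_device) = pvDiffWitnessOut_replace_global_with_device.2 ∧ pvDiffWitnessOut_replace_global_with_device.1 ≠ pvDiffWitnessOut_replace_global_with_device.2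

def Claim_exact_replace_global_with_device : Prop := ∀ (lines : List String), Dom_replace_global_with_device lines → Pre_replace_global_with_device lines → D_replace_global_with_device lines → replace_global_with_device lines ≠ replace_global_with_device_alt lines

-- ===== LEMMAS AND PROOFS =====

-- proof-side abbreviation: the parameter text as the ports compute it (Str level)
def pvInner (line : String) : String :=
  (PySem.List.pyGet? ((PySem.Str.split?
    ((PySem.List.pyGet? ((PySem.Str.split?
      ((PySem.List.pyGet? ((PySem.Str.split? line "void").getD []) 1).getD "") "(").getD []) 1).getD "")
    ")").getD []) 0).getD ""

theorem pvGet1 (l : List String) :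
    ((PySem.List.pyGet? l 1).getD "").toList = ((l.map String.toList).drop 1).headD [] := by
  rcases l with _ | ⟨a, _ | ⟨b, t⟩⟩ <;> simp [PySem.List.pyGet?, PySem.List.pyIdx?]

theorem pvGet0 (l : List String) :
    ((PySem.List.pyGet? l 0).getD "").toList = (l.map String.toList).headD [] := by
  rcases l with _ | ⟨a, t⟩ <;> simp [PySem.List.pyGet?, PySem.List.pyIdx?]

theorem pvGoAcc (sep : List Char) (fuel : Nat) : ∀ (l cur : List Char) (acc : List (List Char)),
    PySem.Chars.splitOn.go sep fuel l cur acc = acc.reverse ++ PySem.Chars.splitOn.go sep fuel l cur [] := by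
  induction fuel with
  | zero => intro l cur acc; rw [PySem.Chars.splitOn.go.eq_def, PySem.Chars.splitOn.go.eq_def]; simp
  | succ f ih =>
    intro l cur acc
    rw [PySem.Chars.splitOn.go.eq_def]
    conv_rhs => rw [PySem.Chars.splitOn.go.eq_def]
    cases l with
    | nil => simp
    | cons c rest =>
      simp only
      split_ifs with h
      · rw [ih _ _ (cur.reverse :: acc), ih _ _ [cur.reverse]]; simp
      · rw [ih rest (c :: cur) acc]

theorem pvGoNeNil (sep : List Char) (fuel : Nat) : ∀ (l cur : List Char) (acc : List (List Char)),
    PySem.Chars.splitOn.go sep fuel l cur acc ≠ [] := by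
  induction fuel with
  | zero => intro l cur acc; rw [PySem.Chars.splitOn.go.eq_def]; simp
  | succ f ih =>
    intro l cur acc
    rw [PySem.Chars.splitOn.go.eq_def]
    cases l with
    | nil => simp
    | cons c rest =>
      simp only
      split_ifs with h
      · exact ih _ _ _
      · exact ih _ _ _

theorem pvGoJoin (sep : List Char) (hsep : sep ≠ []) (fuel : Nat) : ∀ (l cur : List Char),
    l.length < fuel →
    PySem.Chars.join sep (PySem.Chars.splitOn.go sep fuel l cur []) = cur.reverse ++ l := by
  induction fuel with
  | zero => intro l cur h; omega
  | succ f ih =>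
    intro l cur h
    rw [PySem.Chars.splitOn.go.eq_def]
    cases l with
    | nil => simp [PySem.Chars.join_singleton]
    | cons c rest =>
      simp only
      split_ifs with hp
      · rw [pvGoAcc]
        simp only [List.reverse_cons, List.reverse_nil, List.nil_append]
        have hne := pvGoNeNil sep f (List.drop sep.length (c :: rest)) [] []
        obtain ⟨y, t, hyt⟩ : ∃ y t, PySem.Chars.splitOn.go sep f (List.drop sep.length (c :: rest)) [] [] = y :: t := by
          cases hgo : PySem.Chars.splitOn.go sep f (List.drop sep.length (c :: rest)) [] [] with
          | nil => exact absurd hgo hne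
          | cons y t => exact ⟨y, t, rfl⟩
        rw [List.singleton_append, hyt, PySem.Chars.join_cons_cons, ← hyt]
        have hlen : (List.drop sep.length (c :: rest)).length < f := by
          have hsl : 0 < sep.length := List.length_pos_of_ne_nil hsep
          simp only [List.length_drop]
          simp at h ⊢; omega
        rw [ih _ [] hlen]
        rw [List.isPrefixOf_iff_prefix] at hp
        obtain ⟨t2, ht2⟩ := hp
        simp [← ht2]
      · rw [ih rest (c :: cur) (by simp at h ⊢; omega)]
        simp

theorem pvSplitNeNil (cs sep : List Char) : PySem.Chars.splitOn cs sep ≠ [] :=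
  pvGoNeNil sep _ cs [] []

theorem pvJoinSplit (cs sep : List Char) (hsep : sep ≠ []) :
    PySem.Chars.join sep (PySem.Chars.splitOn cs sep) = cs := by
  have := pvGoJoin sep hsep (cs.length + 1) cs [] (by omega)
  simpa [PySem.Chars.splitOn] using this

theorem pvStrSplit (s sep : String) (h : ¬ sep.toList.isEmpty) :
    ((PySem.Str.split? s sep).getD []).map String.toList = PySem.Chars.splitOn s.toList sep.toList := by
  have hm := PySem.Str.split?_map s sep
  rw [PySem.Chars.split?, if_neg (by simpa using h)] at hm
  cases hsp : PySem.Str.split? s sep with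
  | none => rw [hsp] at hm; simp at hm
  | some l => rw [hsp] at hm; simpa using hm

theorem pvSliceDropLast (l : List String) : PySem.List.slice l none (some (-1)) = l.dropLast := by
  simp [PySem.List.slice, PySem.List.clampIdx]
  rcases l with _ | ⟨a, t⟩ <;> simp [List.dropLast_eq_take]

theorem pvGetNegOne (l : List String) : PySem.List.pyGet? l (-1) = l.getLast? := by
  simp [PySem.List.pyGet?, PySem.List.pyIdx?]
  rcases l with _ | ⟨a, t⟩ <;> simp [List.getLast?_eq_getElem?]

theorem pvFindIsIn (sub s : String) : PySem.Str.isIn sub s = true ↔ PySem.Str.find s sub ≠ -1 := by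
  simp [PySem.Str.isIn_eq, PySem.Str.find_eq, PySem.Chars.isIn, bne]

theorem pvJoinAppend (sep x : List Char) : ∀ (l : List (List Char)), l ≠ [] →
    PySem.Chars.join sep (l ++ [x]) = PySem.Chars.join sep l ++ sep ++ x := by
  intro l
  induction l with
  | nil => intro h; exact absurd rfl h
  | cons a t ih =>
    intro _
    cases t with
    | nil => simp [PySem.Chars.join_cons_cons, PySem.Chars.join_singleton]
    | cons b t2 =>
      rw [show (a :: b :: t2) ++ [x] = a :: ((b :: t2) ++ [x]) from by simp,
        show (b :: t2) ++ [x] = b :: (t2 ++ [x]) from by simp, PySem.Chars.join_cons_cons,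
        show (b :: (t2 ++ [x])) = (b :: t2) ++ [x] from by simp, ih (by simp),
        PySem.Chars.join_cons_cons]
      simp

theorem pvGoLen (sep : List Char) (hsep : sep ≠ []) (fuel : Nat) : ∀ (l cur : List Char),
    l.length < fuel →
    (1 < (PySem.Chars.splitOn.go sep fuel l cur []).length ↔ ∃ j, sep <+: List.drop j l) := by
  induction fuel with
  | zero => intro l cur h; exact (Nat.not_lt_zero _ h).elim
  | succ f ih =>
    intro l cur h
    rw [PySem.Chars.splitOn.go.eq_def]
    cases l with
    | nil =>
      simp only [List.reverse_cons, List.reverse_nil, List.nil_append, List.length_cons,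
        List.length_nil, List.drop_nil]
      constructor
      · intro hlt; exact absurd hlt (by omega)
      · rintro ⟨j, hj⟩
        exact absurd (List.prefix_nil.mp hj) hsep
    | cons c rest =>
      simp only
      split_ifs with hp
      · rw [pvGoAcc]
        constructor
        · intro _; exact ⟨0, by rw [List.drop_zero]; exact (List.isPrefixOf_iff_prefix).1 hp⟩
        · intro _
          have hne := pvGoNeNil sep f (List.drop sep.length (c :: rest)) [] []
          simp only [List.reverse_cons, List.reverse_nil, List.nil_append, List.length_append,
            List.length_cons, List.length_nil]
          cases hgo : PySem.Chars.splitOn.go sep f (List.drop sep.length (c :: rest)) [] [] with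
          | nil => exact absurd hgo hne
          | cons y t => simp
      · rw [ih rest (c :: cur) (by simp at h ⊢; omega)]
        constructor
        · rintro ⟨j, hj⟩; exact ⟨j + 1, by simpa using hj⟩
        · rintro ⟨j, hj⟩
          cases j with
          | zero =>
            rw [List.drop_zero] at hj
            exact absurd ((List.isPrefixOf_iff_prefix).2 hj) (by simpa using hp)
          | succ j' => exact ⟨j', by simpa using hj⟩


-- A's split-into-(type, name)-and-rejoin of one ", "-segment
theorem pvSeg (seg : String) :
    PySem.Str.join " " (PySem.List.slice ((PySem.Str.split? seg " ").getD []) none (some (-1))) ++ " " ++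
      ((PySem.List.pyGet? ((PySem.Str.split? seg " ").getD []) (-1)).getD "")
    = if PySem.Str.isIn " " seg then seg else " " ++ seg := by
  have hmap : ((PySem.Str.split? seg " ").getD []).map String.toList
      = PySem.Chars.splitOn seg.toList [' '] := pvStrSplit seg " " (by decide)
  set ps := (PySem.Str.split? seg " ").getD [] with hps
  have hne : ps ≠ [] := by
    intro h0
    exact pvSplitNeNil seg.toList [' '] (by rw [← hmap, h0]; rfl)
  have hcond : PySem.Str.isIn " " seg = true ↔ 1 < ps.length := by
    rw [show PySem.Str.isIn " " seg = PySem.Chars.isIn [' '] seg.toList from by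
        simp [PySem.Str.isIn_eq]]
    rw [show (1 < ps.length ↔ 1 < (PySem.Chars.splitOn seg.toList [' ']).length) from by
        rw [← hmap]; simp]
    rw [PySem.Chars.splitOn, pvGoLen [' '] (by simp) (seg.toList.length + 1) seg.toList [] (by omega)]
    exact (PySem.Chars.exists_prefix_drop_iff_isIn [' '] seg.toList).symm
  by_cases hin : PySem.Str.isIn " " seg = true
  · rw [if_pos hin]
    have hlen : 1 < ps.length := hcond.mp hin
    have hsplit : ps = ps.dropLast ++ [ps.getLast hne] := (List.dropLast_append_getLast hne).symm
    have hdne : ps.dropLast ≠ [] := by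
      intro h0
      have := congrArg List.length hsplit
      rw [h0] at this; simp at this; omega
    rw [pvSliceDropLast, pvGetNegOne, List.getLast?_eq_some_getLast hne, Option.getD_some]
    apply String.toList_inj.mp
    rw [String.toList_append, String.toList_append, PySem.Str.toList_join,
      show (" " : String).toList = [' '] from rfl]
    rw [← pvJoinAppend [' '] (ps.getLast hne).toList (ps.dropLast.map String.toList)
      (fun h0 => hdne (List.map_eq_nil_iff.mp h0))]
    have hm2 : ps.dropLast.map String.toList ++ [(ps.getLast hne).toList] = ps.map String.toList := by
      conv_rhs => rw [hsplit]
      simp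
    rw [hm2, hmap, pvJoinSplit seg.toList [' '] (by simp)]
  · rw [if_neg hin]
    have hlen : ps.length = 1 := by
      have h1 : ¬ 1 < ps.length := fun hl => hin (hcond.mpr hl)
      have h2 : 0 < ps.length := List.length_pos_of_ne_nil hne
      omega
    obtain ⟨p, hp⟩ : ∃ p, ps = [p] := List.length_eq_one_iff.mp hlen
    have hpseg : p = seg := by
      apply String.toList_inj.mp
      have := pvJoinSplit seg.toList [' '] (by simp)
      rw [← hmap, hp] at this
      simpa [PySem.Chars.join_singleton] using this
    rw [hp, pvSliceDropLast, pvGetNegOne,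
      show ([p] : List String).dropLast = [] from rfl,
      show ([p] : List String).getLast? = some p from rfl, Option.getD_some]
    apply String.toList_inj.mp
    simp only [String.toList_append, PySem.Str.toList_join, List.map_nil, PySem.Chars.join_nil,
      List.nil_append, hpseg]

-- the ", "-split/rejoin of the parameter text is the identity
theorem pvJoinSegs (inner : String) :
    PySem.Str.join ", " ((PySem.Str.split? inner ", ").getD []) = inner := by
  apply String.toList_inj.mp
  rw [PySem.Str.toList_join, pvStrSplit inner ", " (by decide)]
  exact pvJoinSplit inner.toList [',', ' '] (by simp)

-- the assembled declaration literals re-associated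
theorem pvAsm (nm J : String) :
    "__device__ " ++ ("void" ++ " " ++ (nm ++ "_device") ++ "(" ++ J ++ ")")
    = "__device__ void " ++ nm ++ "_device(" ++ J ++ ")" := by
  simp [String.append_assoc]
  rw [← String.append_assoc, show ("__device__ " ++ "void " : String) = "__device__ void " from by decide]

-- A's split/generate pipeline produces B's directly-sliced declaration string, provided every
-- parameter segment of the line contains a space (i.e. the line is not in the D_ region)
theorem pvDeclJoin (line : String) :
    "__device__ " ++ pvGenerateFunctionDeclaration (pvSplitFunctionDeclaration line).2.1
        ((pvSplitFunctionDeclaration line).2.2.1 ++ "_device") (pvSplitFunctionDeclaration line).2.2.2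
    = "__device__ void " ++
        (PySem.Str.strip ((PySem.List.pyGet? ((PySem.Str.split?
          ((PySem.List.pyGet? ((PySem.Str.split? line "void").getD []) 1).getD "") "(").getD []) 0).getD "")) ++
        "_device(" ++ PySem.Str.join ", " (((PySem.Str.split? (pvInner line) ", ").getD []).map
          (fun s => if PySem.Str.isIn " " s then s else " " ++ s)) ++ ")" := by
  have hgen : ∀ (rt nm : String) (ps : List (PySem.Dict String String)),
      pvGenerateFunctionDeclaration rt nm ps =
      rt ++ " " ++ nm ++ "(" ++ PySem.Str.join ", " (ps.foldl (fun acc param =>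
        acc ++ [(PySem.Dict.get? param "type").getD "" ++ " " ++ (PySem.Dict.get? param "name").getD ""]) []) ++ ")" :=
    fun _ _ _ => rfl
  have hsd : pvSplitFunctionDeclaration line =
    ((PySem.List.pyGet? ((PySem.Str.split? line "void").getD []) 0).getD "", "void",
     PySem.Str.strip ((PySem.List.pyGet? ((PySem.Str.split?
       ((PySem.List.pyGet? ((PySem.Str.split? line "void").getD []) 1).getD "") "(").getD []) 0).getD ""),
     ((PySem.Str.split? (pvInner line) ", ").getD []).foldl (fun acc param_str =>
      let ps := (PySem.Str.split? param_str " ").getD []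
      let param_name := (PySem.List.pyGet? ps (-1)).getD ""
      let param_type := PySem.Str.join " " (PySem.List.slice ps none (some (-1)))
      acc ++ [(⟨[("name", param_name), ("type", param_type)]⟩ : PySem.Dict String String)]) []) := by
    unfold pvSplitFunctionDeclaration pvInner; rfl
  rw [hgen, hsd]
  simp only
  rw [show (fun (acc : List (PySem.Dict String String)) (param_str : String) =>
      let ps := (PySem.Str.split? param_str " ").getD []
      let param_name := (PySem.List.pyGet? ps (-1)).getD ""
      let param_type := PySem.Str.join " " (PySem.List.slice ps none (some (-1)))
      acc ++ [(⟨[("name", param_name), ("type", param_type)]⟩ : PySem.Dict String String)]) =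
    (fun (acc : List (PySem.Dict String String)) (param_str : String) =>
      acc ++ [(⟨[("name", (PySem.List.pyGet? ((PySem.Str.split? param_str " ").getD []) (-1)).getD ""),
        ("type", PySem.Str.join " " (PySem.List.slice ((PySem.Str.split? param_str " ").getD []) none (some (-1))))]⟩ :
        PySem.Dict String String)]) from rfl]
  rw [PySem.List.foldl_append_singleton_eq_map, List.nil_append,
    PySem.List.foldl_append_singleton_eq_map, List.nil_append, List.map_map]
  refine Eq.trans (pvAsm _ _) ?_
  refine congrArg (fun J => "__device__ void " ++
      (PySem.Str.strip ((PySem.List.pyGet? ((PySem.Str.split?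
        ((PySem.List.pyGet? ((PySem.Str.split? line "void").getD []) 1).getD "") "(").getD []) 0).getD "")) ++
      "_device(" ++ J ++ ")") ?_
  refine congrArg (PySem.Str.join ", ") (List.map_congr_left ?_)
  intro seg hseg
  simp only [Function.comp_apply]
  rw [show (PySem.Dict.get? (⟨[("name", (PySem.List.pyGet? ((PySem.Str.split? seg " ").getD []) (-1)).getD ""),
        ("type", PySem.Str.join " " (PySem.List.slice ((PySem.Str.split? seg " ").getD []) none (some (-1))))]⟩ :
        PySem.Dict String String) "type").getD ""
      = PySem.Str.join " " (PySem.List.slice ((PySem.Str.split? seg " ").getD []) none (some (-1))) from by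
    simp [PySem.Dict.get?, List.find?]]
  rw [show (PySem.Dict.get? (⟨[("name", (PySem.List.pyGet? ((PySem.Str.split? seg " ").getD []) (-1)).getD ""),
        ("type", PySem.Str.join " " (PySem.List.slice ((PySem.Str.split? seg " ").getD []) none (some (-1))))]⟩ :
        PySem.Dict String String) "name").getD ""
      = (PySem.List.pyGet? ((PySem.Str.split? seg " ").getD []) (-1)).getD "" from by
    simp [PySem.Dict.get?, List.find?]]
  exact pvSeg seg

-- outside the D_ region every segment keeps a space and A's join collapses to the verbatim text
theorem pvDecl (line : String)
    (hall : (((PySem.Str.split? (pvInner line) ", ").getD []).any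
      (fun s => ! PySem.Str.isIn " " s)) = false) :
    "__device__ " ++ pvGenerateFunctionDeclaration (pvSplitFunctionDeclaration line).2.1
        ((pvSplitFunctionDeclaration line).2.2.1 ++ "_device") (pvSplitFunctionDeclaration line).2.2.2
    = "__device__ void " ++
        (PySem.Str.strip ((PySem.List.pyGet? ((PySem.Str.split?
          ((PySem.List.pyGet? ((PySem.Str.split? line "void").getD []) 1).getD "") "(").getD []) 0).getD "")) ++
        "_device(" ++ pvInner line ++ ")" := by
  have hjoin : PySem.Str.join ", " (((PySem.Str.split? (pvInner line) ", ").getD []).map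
      (fun s => if PySem.Str.isIn " " s then s else " " ++ s)) = pvInner line := by
    refine Eq.trans (congrArg (PySem.Str.join ", ")
      (Eq.trans (List.map_congr_left ?_) (List.map_id _))) (pvJoinSegs (pvInner line))
    intro seg hseg
    have hin : PySem.Str.isIn " " seg = true := by
      have := List.any_eq_false.mp hall seg (by simpa using hseg)
      simpa using this
    show (if PySem.Str.isIn " " seg then seg else " " ++ seg) = id seg
    rw [if_pos hin]; rfl
  rw [pvDeclJoin line, hjoin]

-- the D_ shape condition at Chars level equals the Str-level condition the proofs use
theorem pvBad_eq (line : String) :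
    pvBadLine line = (PySem.Str.isIn "void" line &&
      (((PySem.Str.split? (pvInner line) ", ").getD []).any (fun s => ! PySem.Str.isIn " " s))) := by
  unfold pvBadLine pvInner pvCut
  rw [← pvStrSplit line "void" (by decide), ← pvGet1]
  rw [← pvStrSplit _ "(" (by decide), ← pvGet1]
  rw [← pvStrSplit _ ")" (by decide), ← pvGet0]
  rw [← pvStrSplit _ ", " (by decide), List.any_map]
  refine congrArg₂ (· && ·) (PySem.Str.isIn_eq "void" line).symm ?_
  refine congrArg _ (funext fun s => ?_)
  simp [Function.comp, PySem.Str.isIn_eq]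

-- per-line equality of the two transformations outside the D_ region
theorem pvLine (line : String) (acc : List String)
    (hnd : ¬ (PySem.Str.isIn "void" line = true ∧
      (((PySem.Str.split? (pvInner line) ", ").getD []).any
        (fun s => ! PySem.Str.isIn " " s)) = true)) :
    (if PySem.Str.find line "void" ≠ -1 then
      let sd := pvSplitFunctionDeclaration line
      let new_line := "__device__ " ++ pvGenerateFunctionDeclaration sd.2.1 (sd.2.2.1 ++ "_device") sd.2.2.2
      let new_line2 := if PySem.Str.find line "{" ≠ -1 then new_line ++ "{" else new_line
      acc ++ [new_line2 ++ "\n"]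
    else acc ++ [line])
    =
    (if PySem.Str.isIn "void" line then
      let mid := (PySem.List.pyGet? ((PySem.Str.split? line "void").getD []) 1).getD ""
      let name := PySem.Str.strip ((PySem.List.pyGet? ((PySem.Str.split? mid "(").getD []) 0).getD "")
      let params :=
        (PySem.List.pyGet? ((PySem.Str.split?
          ((PySem.List.pyGet? ((PySem.Str.split? mid "(").getD []) 1).getD "") ")").getD []) 0).getD ""
      acc ++ ["__device__ void " ++ name ++ "_device(" ++ params ++ ")" ++
        (if PySem.Str.isIn "{" line then "{" else "") ++ "\n"]
    else acc ++ [line]) := by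
  by_cases hv : PySem.Str.find line "void" ≠ -1
  case neg =>
    rw [if_neg hv, if_neg (fun hb => hv ((pvFindIsIn "void" line).mp hb))]
  case pos =>
    rw [if_pos hv, if_pos ((pvFindIsIn "void" line).mpr hv)]
    simp only
    have hall : (((PySem.Str.split? (pvInner line) ", ").getD []).any
        (fun s => ! PySem.Str.isIn " " s)) = false := by
      by_contra h
      exact hnd ⟨(pvFindIsIn "void" line).mpr hv, by simpa using h⟩
    rw [pvDecl line hall]
    show acc ++ [(if PySem.Str.find line "{" ≠ -1 then _ ++ "{" else _) ++ "\n"] = _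
    rw [show pvInner line = (PySem.List.pyGet? ((PySem.Str.split?
          ((PySem.List.pyGet? ((PySem.Str.split?
            ((PySem.List.pyGet? ((PySem.Str.split? line "void").getD []) 1).getD "") "(").getD []) 1).getD "")
          ")").getD []) 0).getD "" from rfl]
    by_cases hb : PySem.Str.find line "{" ≠ -1
    · rw [if_pos hb, if_pos ((pvFindIsIn "{" line).mpr hb)]
    · rw [if_neg hb, if_neg (fun hc => hb ((pvFindIsIn "{" line).mp hc)), String.append_empty]

-- ===== machinery for the tightness theorem =====

-- A's per-line transformation
def pvA (line : String) : String :=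
  if PySem.Str.find line "void" ≠ -1 then
    (if PySem.Str.find line "{" ≠ -1 then
      ("__device__ " ++ pvGenerateFunctionDeclaration (pvSplitFunctionDeclaration line).2.1
        ((pvSplitFunctionDeclaration line).2.2.1 ++ "_device") (pvSplitFunctionDeclaration line).2.2.2) ++ "{"
    else
      "__device__ " ++ pvGenerateFunctionDeclaration (pvSplitFunctionDeclaration line).2.1
        ((pvSplitFunctionDeclaration line).2.2.1 ++ "_device") (pvSplitFunctionDeclaration line).2.2.2) ++ "\n"
  else line

-- B's per-line transformation
def pvB (line : String) : String :=
  if PySem.Str.isIn "void" line then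
    "__device__ void " ++
      PySem.Str.strip ((PySem.List.pyGet? ((PySem.Str.split?
        ((PySem.List.pyGet? ((PySem.Str.split? line "void").getD []) 1).getD "") "(").getD []) 0).getD "") ++
      "_device(" ++ pvInner line ++ ")" ++
      (if PySem.Str.isIn "{" line then "{" else "") ++ "\n"
  else line

theorem pvAmap (lines : List String) : replace_global_with_device lines = lines.map pvA := by
  unfold replace_global_with_device
  rw [show (fun (new_lines : List String) (line : String) =>
      if PySem.Str.find line "void" ≠ -1 then
        let sd := pvSplitFunctionDeclaration line
        let new_line := "__device__ " ++ pvGenerateFunctionDeclaration sd.2.1 (sd.2.2.1 ++ "_device") sd.2.2.2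
        let new_line2 := if PySem.Str.find line "{" ≠ -1 then new_line ++ "{" else new_line
        new_lines ++ [new_line2 ++ "\n"]
      else new_lines ++ [line])
    = (fun new_lines line => new_lines ++ [pvA line]) from by
      funext nl line
      unfold pvA
      dsimp only
      split_ifs <;> rfl]
  rw [PySem.List.foldl_append_singleton_eq_map, List.nil_append]

theorem pvBmap (lines : List String) : replace_global_with_device_alt lines = lines.map pvB := by
  unfold replace_global_with_device_alt
  rw [show (fun (out : List String) (line : String) =>
      if PySem.Str.isIn "void" line then
        let mid := (PySem.List.pyGet? ((PySem.Str.split? line "void").getD []) 1).getD ""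
        let name := PySem.Str.strip ((PySem.List.pyGet? ((PySem.Str.split? mid "(").getD []) 0).getD "")
        let params :=
          (PySem.List.pyGet? ((PySem.Str.split?
            ((PySem.List.pyGet? ((PySem.Str.split? mid "(").getD []) 1).getD "") ")").getD []) 0).getD ""
        out ++ ["__device__ void " ++ name ++ "_device(" ++ params ++ ")" ++
          (if PySem.Str.isIn "{" line then "{" else "") ++ "\n"]
      else out ++ [line])
    = (fun out line => out ++ [pvB line]) from by
      funext nl line
      unfold pvB pvInner
      dsimp only
      split_ifs <;> rfl]
  rw [PySem.List.foldl_append_singleton_eq_map, List.nil_append]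

theorem pvJoinLen (sep : List Char) (l : List (List Char)) :
    (PySem.Chars.join sep l).length = (l.map List.length).sum + sep.length * (l.length - 1) := by
  induction l with
  | nil => simp [PySem.Chars.join_nil]
  | cons a t ih =>
    cases t with
    | nil => simp [PySem.Chars.join_singleton]
    | cons b t2 =>
      rw [PySem.Chars.join_cons_cons]
      simp only [List.length_append, List.map_cons, List.sum_cons, List.length_cons,
        Nat.add_sub_cancel] at ih ⊢
      rw [ih, Nat.mul_succ]
      omega

theorem pvJoinLenStr (l : List String) :
    (PySem.Str.join ", " l).toList.length
      = (l.map (fun s => s.toList.length)).sum + 2 * (l.length - 1) := by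
  rw [PySem.Str.toList_join, show (", " : String).toList = [',', ' '] from rfl, pvJoinLen]
  simp only [List.map_map, Function.comp_def, List.length_map, List.length_cons, List.length_nil]

theorem pvMapLenGe (t : List String) :
    (t.map (fun s => ((if PySem.Str.isIn " " s then s else " " ++ s).toList.length))).sum
      ≥ (t.map (fun s => s.toList.length)).sum := by
  induction t with
  | nil => simp
  | cons a t ih =>
    simp only [List.map_cons, List.sum_cons]
    have h : (if PySem.Str.isIn " " a then a else " " ++ a).toList.length ≥ a.toList.length := by
      by_cases hb : PySem.Str.isIn " " a = true
      · rw [if_pos hb]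
      · rw [if_neg hb]; simp
    omega

theorem pvMapLenLt (segs : List String)
    (h : ∃ s ∈ segs, PySem.Str.isIn " " s = false) :
    (segs.map (fun s => s.toList.length)).sum
      < (segs.map (fun s => ((if PySem.Str.isIn " " s then s else " " ++ s).toList.length))).sum := by
  induction segs with
  | nil => simp at h
  | cons a t ih =>
    simp only [List.map_cons, List.sum_cons]
    obtain ⟨s, hs, hsp⟩ := h
    rcases List.mem_cons.mp hs with rfl | hmem
    · have h1 : (if PySem.Str.isIn " " s then s else " " ++ s).toList.length
          = s.toList.length + 1 := by
        rw [if_neg (by rw [hsp]; simp)]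
        rw [show ((" " ++ s : String)).toList = ' ' :: s.toList from by simp]
        simp [Nat.add_comm]
      have h2 := pvMapLenGe t
      omega
    · have h2 := ih ⟨s, hmem, hsp⟩
      have h3 : (if PySem.Str.isIn " " a then a else " " ++ a).toList.length ≥ a.toList.length := by
        by_cases hb : PySem.Str.isIn " " a = true
        · rw [if_pos hb]
        · rw [if_neg hb]; simp
      omega

-- on a D_ line A's rejoined parameter text is strictly longer than the verbatim text
theorem pvParamsLen (line : String)
    (h : ∃ s ∈ (PySem.Str.split? (pvInner line) ", ").getD [], PySem.Str.isIn " " s = false) :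
    (pvInner line).toList.length <
      (PySem.Str.join ", " (((PySem.Str.split? (pvInner line) ", ").getD []).map
        (fun s => if PySem.Str.isIn " " s then s else " " ++ s))).toList.length := by
  have hB := pvJoinLenStr ((PySem.Str.split? (pvInner line) ", ").getD [])
  rw [pvJoinSegs] at hB
  have hA := pvJoinLenStr (((PySem.Str.split? (pvInner line) ", ").getD []).map
    (fun s => if PySem.Str.isIn " " s then s else " " ++ s))
  simp only [List.map_map, Function.comp_def, List.length_map] at hA
  have hlt := pvMapLenLt ((PySem.Str.split? (pvInner line) ", ").getD []) h
  omega

-- ===== VERDICT (by name: the statements are the Claim_ definitions above) =====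
theorem replace_global_with_device_spec : Claim_unchanged_replace_global_with_device := by
  intro lines _ _ hnd
  unfold replace_global_with_device replace_global_with_device_alt
  apply PySem.List.foldl_congr_mem
  intro acc line hmem
  refine pvLine line acc (fun hbad => hnd ⟨line, hmem, ?_⟩)
  rw [pvBad_eq, hbad.1, hbad.2]; rfl

theorem replace_global_with_device_changed : Claim_changed_replace_global_with_device := by
  unfold Claim_changed_replace_global_with_device; decide

theorem replace_global_with_device_tight : Claim_exact_replace_global_with_device := by
  unfold Claim_exact_replace_global_with_device
  intro lines _ _ hd heq
  obtain ⟨line, hmem, hbad⟩ := hd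
  rw [pvBad_eq, Bool.and_eq_true] at hbad
  obtain ⟨hvoid, hany⟩ := hbad
  rw [List.any_eq_true] at hany
  obtain ⟨s0, hs0, hsp⟩ := hany
  have hsp' : PySem.Str.isIn " " s0 = false := by simpa using hsp
  rw [pvAmap, pvBmap] at heq
  obtain ⟨i, hi, hline⟩ := List.mem_iff_getElem.mp hmem
  have h2 : pvA line = pvB line := by
    have h3 := congrArg (fun l => l[i]?) heq
    simp only [List.getElem?_map, List.getElem?_eq_getElem hi, Option.map_some] at h3
    rw [hline] at h3
    exact Option.some.inj h3
  have hfind : PySem.Str.find line "void" ≠ -1 := (pvFindIsIn "void" line).mp hvoid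
  unfold pvA pvB at h2
  rw [if_pos hfind, if_pos hvoid, pvDeclJoin line] at h2
  have hplt := pvParamsLen line ⟨s0, hs0, hsp'⟩
  by_cases hbr : PySem.Str.find line "{" ≠ -1
  · rw [if_pos hbr, if_pos ((pvFindIsIn "{" line).mpr hbr)] at h2
    have hlen := congrArg (fun s => s.toList.length) h2
    simp only [String.toList_append, List.length_append] at hlen
    omega
  · rw [if_neg hbr, if_neg (fun hc => hbr ((pvFindIsIn "{" line).mp hc))] at h2
    have hlen := congrArg (fun s => s.toList.length) h2
    simp only [String.toList_append, List.length_append,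
      show ("" : String).toList = [] from rfl, List.length_nil] at hlen
    omega
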